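-- pv_equiv track=rewrite | github.com/JeanKesselring/omakase | email_scraper.py | rank_emails
-- ===== SOURCE A (Python) =====
-- def rank_emails(emails: list[str], domain: str) -> list[str]:
--     """
--     Sort emails so the most likely contact address comes first.
--     Prefers emails on the shop's own domain, then common prefixes.
--     """
--     preferred_prefixes = ("info", "contact", "shop", "hello", "mail", "office", "hallo")
--
--     def score(email: str) -> int:
--         local, host = email.split("@", 1)
--         s = 0
--         if domain and domain in host:
--             s += 10
--         if any(local.startswith(p) for p in preferred_prefixes):
--             s += 5
--         return s
--
--     return sorted(emails, key=score, reverse=True)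
-- ===== SOURCE B (Python) =====
-- def rank_emails(emails: list[str], domain: str) -> list[str]:
--     """
--     Sort emails so the most likely contact address comes first.
--     Bucket (counting-sort) version: one forward pass distributes each email
--     into one of the four possible score buckets {15, 10, 5, 0}; concatenating
--     the buckets high-to-low is exactly the stable descending sort by score.
--     """
--     preferred_prefixes = ("info", "contact", "shop", "hello", "mail", "office", "hallo")
--     buckets = {15: [], 10: [], 5: [], 0: []}
--     for email in emails:
--         local, host = email.split("@", 1)
--         s = 10 if (domain and domain in host) else 0
--         if local.startswith(preferred_prefixes):
--             s += 5
--         buckets[s].append(email)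
--     return buckets[15] + buckets[10] + buckets[5] + buckets[0]
-- ===== Notes on version B (the rewrite author's own statement) =====
-- stated objective: alternative
-- what changed: Replaces the comparison sort (sorted with key, reverse=True) by a one-pass distribution sort: each email is appended to one of four buckets keyed by its score in {0,5,10,15} and the buckets are concatenated in descending score order, which reproduces the stable descending order exactly.
-- outside the precondition, e.g. on rank_emails(['nobody'], 'x.com'): A raises ValueError, B raises ValueError
import Mathlib
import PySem

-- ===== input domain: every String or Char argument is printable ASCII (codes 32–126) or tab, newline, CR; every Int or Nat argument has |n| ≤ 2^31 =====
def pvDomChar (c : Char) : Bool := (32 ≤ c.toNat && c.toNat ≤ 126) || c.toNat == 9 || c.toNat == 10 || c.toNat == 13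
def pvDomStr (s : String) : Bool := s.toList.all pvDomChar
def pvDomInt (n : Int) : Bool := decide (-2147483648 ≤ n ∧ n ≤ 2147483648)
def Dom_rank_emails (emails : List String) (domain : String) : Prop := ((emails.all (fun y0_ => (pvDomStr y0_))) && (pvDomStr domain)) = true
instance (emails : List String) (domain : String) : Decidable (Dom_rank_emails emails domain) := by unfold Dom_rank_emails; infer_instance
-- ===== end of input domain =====

-- B replaces the comparison sort by a one-pass four-bucket distribution sort over the score set {0,5,10,15}; same results, similar cost.


-- ===== PORT A =====
def pvPrefixes : List String := ["info", "contact", "shop", "hello", "mail", "office", "hallo"]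

-- score(email); the `| _ => 0` arm is Python's ValueError on unpacking (no '@'), excluded by Pre_
def pvScore (domain : String) (email : String) : Int :=
  match (PySem.Str.splitMax? email "@" 1).getD [] with
  | [lo, host] =>
      (if (!(domain == "")) && PySem.Str.isIn domain host then 10 else 0)
        + (if pvPrefixes.any (fun p => PySem.Str.startswith lo p) then 5 else 0)
  | _ => 0

def rank_emails (emails : List String) (domain : String) : List String :=
  PySem.List.sorted emails (pvScore domain) true

-- ===== PORT B =====
-- one step of B's loop: distribute email into the (15,10,5,0) buckets; the `| _ => b` arm is Python's ValueError, excluded by Pre_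
def pvStep (domain : String) (b : List String × List String × List String × List String)
    (email : String) : List String × List String × List String × List String :=
  match (PySem.Str.splitMax? email "@" 1).getD [] with
  | [lo, host] =>
      let s0 : Int := if (!(domain == "")) && PySem.Str.isIn domain host then 10 else 0
      let s : Int := if pvPrefixes.any (fun p => PySem.Str.startswith lo p) then s0 + 5 else s0
      if s == 15 then (b.1 ++ [email], b.2.1, b.2.2.1, b.2.2.2)
      else if s == 10 then (b.1, b.2.1 ++ [email], b.2.2.1, b.2.2.2)
      else if s == 5 then (b.1, b.2.1, b.2.2.1 ++ [email], b.2.2.2)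
      else (b.1, b.2.1, b.2.2.1, b.2.2.2 ++ [email])
  | _ => b

def rank_emails_alt (emails : List String) (domain : String) : List String :=
  let bs := emails.foldl (pvStep domain) ([], [], [], [])
  bs.1 ++ bs.2.1 ++ bs.2.2.1 ++ bs.2.2.2

-- ===== PRECONDITION & SPEC =====
-- Pre_ excludes emails without '@': there `local, host = email.split("@", 1)` raises ValueError in both A and B.
def Pre_rank_emails (emails : List String) (domain : String) : Prop :=
  ∀ e ∈ emails, PySem.Str.isIn "@" e = true
instance (emails : List String) (domain : String) : Decidable (Pre_rank_emails emails domain) := by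
  unfold Pre_rank_emails; infer_instance

def pvWitness_rank_emails : List String × String :=
  (["info@shop.de", "bob@x.com", "contact@shop.de"], "shop.de")

def Spec_rank_emails (emails : List String) (domain : String) (out : List String) : Prop := out = rank_emails_alt emails domain
instance (emails : List String) (domain : String) (out : List String) : Decidable (Spec_rank_emails emails domain out) := by unfold Spec_rank_emails; infer_instance

-- ===== CLAIM (what is proved, stated in full; the proofs are below) =====
def Claim_equal_rank_emails : Prop := ∀ (emails : List String) (domain : String), Dom_rank_emails emails domain → Pre_rank_emails emails domain → Spec_rank_emails emails domain (rank_emails emails domain)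

-- ===== LEMMAS AND PROOFS =====

-- go with budget m = 0 finishes at the next step: the remainder is the last piece
lemma go_zero (c : Char) (fuel : Nat) (l : List Char) (acc : List (List Char)) :
    PySem.Chars.splitOnMax.go [c] fuel 0 l [] acc = (l :: acc).reverse := by
  cases fuel with
  | zero => simp [PySem.Chars.splitOnMax.go]
  | succ f => cases l <;> simp [PySem.Chars.splitOnMax.go]

-- go with budget 1 on a list containing the separator char yields exactly two pieces
lemma go_one_of_mem (c : Char) (fuel : Nat) (l cur : List Char) (acc : List (List Char))
    (hf : l.length ≤ fuel) (hc : c ∈ l) :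
    ∃ a b, PySem.Chars.splitOnMax.go [c] fuel 1 l cur acc = (b :: a :: acc).reverse := by
  induction fuel generalizing l cur acc with
  | zero =>
      exfalso
      cases l with
      | nil => exact (List.not_mem_nil) hc
      | cons x xs => simp at hf
  | succ f ih =>
      cases l with
      | nil => exact absurd hc (List.not_mem_nil)
      | cons x xs =>
          by_cases hx : x = c
          · subst hx
            refine ⟨cur.reverse, xs, ?_⟩
            rw [show PySem.Chars.splitOnMax.go [x] (f+1) 1 (x :: xs) cur acc
                  = PySem.Chars.splitOnMax.go [x] f 0 xs [] (cur.reverse :: acc) from by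
              simp [PySem.Chars.splitOnMax.go, List.isPrefixOf]]
            simpa using go_zero x f xs (cur.reverse :: acc)
          · have hcx : c ∈ xs := by
              rcases List.mem_cons.mp hc with h | h
              · exact absurd h.symm hx
              · exact h
            have hne : c ≠ x := fun h => hx h.symm
            have hf' : xs.length ≤ f := by simp at hf; omega
            obtain ⟨a, b, hab⟩ := ih xs (x :: cur) acc hf' hcx
            refine ⟨a, b, ?_⟩
            rw [show PySem.Chars.splitOnMax.go [c] (f+1) 1 (x :: xs) cur acc
                  = PySem.Chars.splitOnMax.go [c] f 1 xs (x :: cur) acc from by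
              simp [PySem.Chars.splitOnMax.go, List.isPrefixOf, hne]]
            exact hab

-- an email containing '@' splits (maxsplit 1) into exactly two strings
lemma split_two_of_isIn (e : String) (h : PySem.Str.isIn "@" e = true) :
    ∃ lo host, PySem.Str.splitMax? e "@" 1 = some [lo, host] := by
  have hmem : '@' ∈ e.toList := by
    have := (PySem.Str.isIn_iff_infix "@" e).mp h
    simpa using this.mem (by simp : '@' ∈ ("@" : String).toList)
  have h2 : ∃ a b, PySem.Chars.splitOnMax e.toList ['@'] 1 = [a, b] := by
    obtain ⟨a, b, hab⟩ := go_one_of_mem '@' (e.toList.length + 1) e.toList [] []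
      (by omega) hmem
    exact ⟨a, b, by simpa [PySem.Chars.splitOnMax] using hab⟩
  obtain ⟨a, b, hab⟩ := h2
  refine ⟨String.ofList a, String.ofList b, ?_⟩
  simp [PySem.Str.splitMax?, PySem.Chars.splitMax?, hab]

-- the score takes only the four values 15, 10, 5, 0
lemma score_cases (domain e : String) :
    pvScore domain e = 15 ∨ pvScore domain e = 10 ∨ pvScore domain e = 5 ∨ pvScore domain e = 0 := by
  unfold pvScore
  split
  · split_ifs <;> simp
  · simp

-- insert strictly inside: after everything not-before, before everything before
lemma insertBy_middle {α : Type} (bef : α → α → Bool) (x : α) (A B : List α)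
    (hA : ∀ a ∈ A, bef x a = false) (hB : ∀ b ∈ B, bef x b = true) :
    PySem.List.insertBy bef x (A ++ B) = A ++ x :: B := by
  induction A with
  | nil =>
      cases B with
      | nil => simp [PySem.List.insertBy]
      | cons b bs => simp [PySem.List.insertBy, hB b (by simp)]
  | cons a as ih =>
      have ha := hA a (by simp)
      simp only [List.cons_append, PySem.List.insertBy, ha]
      simp [ih (fun a' h => hA a' (by simp [h])) ]

-- stable descending sort over the key set {15,10,5,0} = concatenation of the score-filtered sublists
lemma sorted_rev_four {α : Type} (key : α → Int) (xs : List α)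
    (h : ∀ x ∈ xs, key x = 15 ∨ key x = 10 ∨ key x = 5 ∨ key x = 0) :
    PySem.List.sorted xs key true =
      xs.filter (fun x => key x == 15) ++ xs.filter (fun x => key x == 10)
        ++ xs.filter (fun x => key x == 5) ++ xs.filter (fun x => key x == 0) := by
  rw [PySem.List.sorted_rev_eq_foldl_insertBy]
  induction xs using List.reverseRecOn with
  | nil => simp
  | append_singleton ys x ih =>
      have hys : ∀ y ∈ ys, key y = 15 ∨ key y = 10 ∨ key y = 5 ∨ key y = 0 :=
        fun y hy => h y (by simp [hy])
      rw [List.foldl_append, ih hys]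
      have hmem15 : ∀ a ∈ ys.filter (fun x => key x == 15), key a = 15 := by
        intro a ha; simpa using (List.mem_filter.mp ha).2
      have hmem10 : ∀ a ∈ ys.filter (fun x => key x == 10), key a = 10 := by
        intro a ha; simpa using (List.mem_filter.mp ha).2
      have hmem5 : ∀ a ∈ ys.filter (fun x => key x == 5), key a = 5 := by
        intro a ha; simpa using (List.mem_filter.mp ha).2
      have hmem0 : ∀ a ∈ ys.filter (fun x => key x == 0), key a = 0 := by
        intro a ha; simpa using (List.mem_filter.mp ha).2
      simp only [List.foldl_cons, List.foldl_nil]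
      rcases h x (by simp) with hx | hx | hx | hx
      · rw [show ys.filter (fun x => key x == 15) ++ ys.filter (fun x => key x == 10)
              ++ ys.filter (fun x => key x == 5) ++ ys.filter (fun x => key x == 0)
            = ys.filter (fun x => key x == 15) ++ (ys.filter (fun x => key x == 10)
              ++ ys.filter (fun x => key x == 5) ++ ys.filter (fun x => key x == 0)) by
            simp [List.append_assoc]]
        rw [insertBy_middle _ x _ _
          (fun a ha => by simp [hmem15 a ha, hx])
          (fun b hb => by
            simp only [List.append_assoc, List.mem_append] at hb
            rcases hb with hb | hb | hb
            · simp [hmem10 b hb, hx]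
            · simp [hmem5 b hb, hx]
            · simp [hmem0 b hb, hx])]
        simp [List.filter_append, List.filter, hx, List.append_assoc]
      · rw [show ys.filter (fun x => key x == 15) ++ ys.filter (fun x => key x == 10)
              ++ ys.filter (fun x => key x == 5) ++ ys.filter (fun x => key x == 0)
            = (ys.filter (fun x => key x == 15) ++ ys.filter (fun x => key x == 10))
              ++ (ys.filter (fun x => key x == 5) ++ ys.filter (fun x => key x == 0)) by
            simp [List.append_assoc]]
        rw [insertBy_middle _ x _ _
          (fun a ha => by
            rcases List.mem_append.mp ha with ha | ha
            · simp [hmem15 a ha, hx]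
            · simp [hmem10 a ha, hx])
          (fun b hb => by
            rcases List.mem_append.mp hb with hb | hb
            · simp [hmem5 b hb, hx]
            · simp [hmem0 b hb, hx])]
        simp [List.filter_append, List.filter, hx, List.append_assoc]
      · rw [show ys.filter (fun x => key x == 15) ++ ys.filter (fun x => key x == 10)
              ++ ys.filter (fun x => key x == 5) ++ ys.filter (fun x => key x == 0)
            = (ys.filter (fun x => key x == 15) ++ ys.filter (fun x => key x == 10)
              ++ ys.filter (fun x => key x == 5)) ++ ys.filter (fun x => key x == 0) by
            simp [List.append_assoc]]
        rw [insertBy_middle _ x _ _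
          (fun a ha => by
            simp only [List.append_assoc, List.mem_append] at ha
            rcases ha with ha | ha | ha
            · simp [hmem15 a ha, hx]
            · simp [hmem10 a ha, hx]
            · simp [hmem5 a ha, hx])
          (fun b hb => by simp [hmem0 b hb, hx])]
        simp [List.filter_append, List.filter, hx, List.append_assoc]
      · rw [PySem.List.insertBy_of_forall_not_before _ x _
          (fun a ha => by
            simp only [List.append_assoc, List.mem_append] at ha
            rcases ha with ha | ha | ha | ha
            · simp [hmem15 a ha, hx]
            · simp [hmem10 a ha, hx]
            · simp [hmem5 a ha, hx]
            · simp [hmem0 a ha, hx])]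
        simp [List.filter_append, List.filter, hx, List.append_assoc]

-- B's step, on an email with '@', appends the email to the bucket of its score
lemma pvStep_eq (domain e : String) (b : List String × List String × List String × List String)
    (lo host : String) (hs : PySem.Str.splitMax? e "@" 1 = some [lo, host]) :
    pvStep domain b e =
      if pvScore domain e == 15 then (b.1 ++ [e], b.2.1, b.2.2.1, b.2.2.2)
      else if pvScore domain e == 10 then (b.1, b.2.1 ++ [e], b.2.2.1, b.2.2.2)
      else if pvScore domain e == 5 then (b.1, b.2.1, b.2.2.1 ++ [e], b.2.2.2)
      else (b.1, b.2.1, b.2.2.1, b.2.2.2 ++ [e]) := by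
  unfold pvStep pvScore
  rw [hs]
  simp only [Option.getD_some]
  rcases Bool.eq_false_or_eq_true ((!(domain == "")) && PySem.Str.isIn domain host) with hc1 | hc1 <;>
    rcases Bool.eq_false_or_eq_true (pvPrefixes.any (fun p => PySem.Str.startswith lo p)) with hc2 | hc2 <;>
      simp only [hc1, hc2] <;> norm_num

-- the loop invariant of B: the final buckets are the four score-filtered sublists
lemma foldl_buckets (domain : String) (emails : List String)
    (hP : ∀ e ∈ emails, PySem.Str.isIn "@" e = true)
    (b : List String × List String × List String × List String) :
    emails.foldl (pvStep domain) b =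
      (b.1 ++ emails.filter (fun e => pvScore domain e == 15),
       b.2.1 ++ emails.filter (fun e => pvScore domain e == 10),
       b.2.2.1 ++ emails.filter (fun e => pvScore domain e == 5),
       b.2.2.2 ++ emails.filter (fun e => pvScore domain e == 0)) := by
  induction emails generalizing b with
  | nil => simp
  | cons e rest ih =>
      obtain ⟨lo, host, hs⟩ := split_two_of_isIn e (hP e (by simp))
      rw [List.foldl_cons, pvStep_eq domain e b lo host hs]
      have hrest : ∀ e' ∈ rest, PySem.Str.isIn "@" e' = true := fun e' h => hP e' (by simp [h])
      rcases score_cases domain e with hx | hx | hx | hx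
      · rw [if_pos (by simp [hx])]
        rw [ih hrest]
        simp [hx, List.append_assoc]
      · rw [if_neg (by simp [hx]), if_pos (by simp [hx])]
        rw [ih hrest]
        simp [hx, List.append_assoc]
      · rw [if_neg (by simp [hx]), if_neg (by simp [hx]), if_pos (by simp [hx])]
        rw [ih hrest]
        simp [hx, List.append_assoc]
      · rw [if_neg (by simp [hx]), if_neg (by simp [hx]), if_neg (by simp [hx])]
        rw [ih hrest]
        simp [hx, List.append_assoc]

-- ===== VERDICT (by name: the statement is the Claim_ definition above) =====
theorem rank_emails_spec : Claim_equal_rank_emails := by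
  intro emails domain _ hP
  unfold Spec_rank_emails rank_emails rank_emails_alt
  rw [foldl_buckets domain emails hP ([], [], [], [])]
  simp only [List.nil_append]
  exact sorted_rev_four (pvScore domain) emails (fun x _ => score_cases domain x)
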